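-- pv_equiv track=rewrite | github.com/choucoder/competitive-programming | practice/codejam/2021/round1A/append_sort.py | solve
-- ===== SOURCE A (Python) =====
-- def solve(x, n):
--
--     r = 0
--
--     for i in range(1, n):
--         _min = x[i - 1]
--         s = len(str(_min)) - 1
--         xi = int(str(x[i]) + '0'*s)
--
--         if xi < _min:
--             xi = int(str(xi) + '0')
--             s = s + 1
--
--         limit = (10**s)
--         for j in range(0, limit):
--             if xi < _min:
--                 xi = xi + j
--
--         x[i] = xi
--         r += s
--
--     return r
-- ===== SOURCE B (Python) =====
-- def solve(x, n):
--     # Same return value as A; does not mutate x (A writes the padded values back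
--     # into the list; equivalence is about the return value).
--     r = 0
--     if n >= 2:
--         prev = x[0]
--         for v in x[1:n]:
--             s = len(str(prev)) - 1
--             xi = int(str(v) + '0' * s)
--             if xi < prev:
--                 xi = int(str(xi) + '0')
--                 s += 1
--             if xi < prev:
--                 # A's inner loop adds j = 0,1,2,... while xi < prev, i.e. it adds the
--                 # triangular number T(k) = k*(k-1)//2 for the least k with
--                 # xi + T(k) >= prev, capped at k = 10**s.  Find that k by binary search.
--                 lo, hi = 0, 10 ** s
--                 while lo < hi:
--                     mid = (lo + hi) // 2
--                     if xi + mid * (mid - 1) // 2 >= prev: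
--                         hi = mid
--                     else:
--                         lo = mid + 1
--                 xi += lo * (lo - 1) // 2
--             prev = xi
--             r += s
--     return r
-- ===== Notes on version B (the rewrite author's own statement) =====
-- stated objective: faster
-- what changed: A's inner loop walks j=0..10**s-1 adding j while xi<prev; B replaces it by a binary search for the least k (capped at 10**s) with xi + k*(k-1)//2 >= prev and adds that triangular number directly, threading prev through one pass instead of re-reading/mutating the list.
import Mathlib
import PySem

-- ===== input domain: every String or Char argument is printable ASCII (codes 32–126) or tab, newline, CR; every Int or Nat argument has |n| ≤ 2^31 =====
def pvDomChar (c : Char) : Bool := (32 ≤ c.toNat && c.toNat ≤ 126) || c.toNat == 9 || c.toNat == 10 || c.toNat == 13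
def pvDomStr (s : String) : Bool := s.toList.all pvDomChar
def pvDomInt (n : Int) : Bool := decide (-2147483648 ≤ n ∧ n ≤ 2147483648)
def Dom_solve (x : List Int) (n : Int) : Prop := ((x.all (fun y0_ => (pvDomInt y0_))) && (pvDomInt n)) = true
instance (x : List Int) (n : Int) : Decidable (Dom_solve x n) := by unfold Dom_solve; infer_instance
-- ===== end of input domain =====

-- B replaces A's O(10^s) inner counting loop by a binary search for the least k with
-- xi + k*(k-1)//2 >= prev (capped at 10**s) and threads prev through a single pass;
-- A mutates its list argument in place, B does not: the equivalence proved here is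
-- about the RETURN value only.

-- shared helpers: both Pythons contain the very same sub-expressions
-- len(str(m))  and  int(str(v) + '0'*s)
def digLen (m : Int) : Int := PySem.Str.len (PySem.Int.toStr m)
-- exact port of int(str(v) + '0'*s) for s ≥ 0 (here always s = len(str(prev)) - 1 ≥ 0):
-- int ∘ str via PySem.Int.ofChars?/toChars, '0'*s via List.replicate
def appendZeros (v s : Int) : Int :=
  (PySem.Int.ofChars? (PySem.Int.toChars v ++ List.replicate s.toNat '0')).getD 0

-- ===== PORT A =====
-- for j in range(0, limit): if xi < _min: xi = xi + j      (fuel = iterations left)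
def solveLoop (p xi j : Int) : Nat → Int
  | 0 => xi
  | f+1 => solveLoop p (if xi < p then xi + j else xi) (j + 1) f

-- body of A's 'for i in range(1, n)' loop; state = (x, r)
def stepA (st : List Int × Int) (i : Int) : List Int × Int :=
  let xs := st.1
  let m := PySem.List.pyGetD xs (i - 1) 0              -- _min = x[i-1]
  let s : Int := digLen m - 1                          -- s = len(str(_min)) - 1
  let xi0 := appendZeros (PySem.List.pyGetD xs i 0) s  -- xi = int(str(x[i]) + '0'*s)
  let xi1 := if xi0 < m then appendZeros xi0 1 else xi0 -- if xi < _min: xi = int(str(xi)+'0')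
  let s1 := if xi0 < m then s + 1 else s                --               s = s + 1
  let limit : Int := 10 ^ s1.toNat                     -- limit = 10**s  (s ≥ 0 always)
  let xi2 := solveLoop m xi1 0 limit.toNat             -- the j-loop
  (PySem.List.pySetD xs i xi2, st.2 + s1)              -- x[i] = xi; r += s

def solve (x : List Int) (n : Int) : Int :=
  ((PySem.List.pyRange 1 n 1).foldl stepA (x, (0 : Int))).2

-- ===== PORT B =====
-- termination measure of the while-loop; cited by bsLoop's decreasing_by
theorem bsLoop_measure (lo hi : Int) (h : lo < hi) :
    lo ≤ PySem.Int.floordiv (lo + hi) 2 ∧ PySem.Int.floordiv (lo + hi) 2 < hi := by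
  constructor
  · rw [PySem.Int.le_floordiv_iff_mul_le (by omega)]; omega
  · rw [PySem.Int.floordiv_lt_iff_lt_mul (by omega)]; omega

-- while lo < hi: mid = (lo+hi)//2; if xi + mid*(mid-1)//2 >= prev: hi = mid else: lo = mid+1
def bsLoop (xi p lo hi : Int) : Int :=
  if h : lo < hi then
    let mid := PySem.Int.floordiv (lo + hi) 2
    if p ≤ xi + PySem.Int.floordiv (mid * (mid - 1)) 2 then bsLoop xi p lo mid
    else bsLoop xi p (mid + 1) hi
  else lo
termination_by (hi - lo).toNat
decreasing_by
  · have := bsLoop_measure lo hi h; omega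
  · have := bsLoop_measure lo hi h; omega

-- body of B's 'for v in x[1:n]' loop; state = (prev, r)
def stepB (st : Int × Int) (v : Int) : Int × Int :=
  let prev := st.1
  let s : Int := digLen prev - 1
  let xi0 := appendZeros v s
  let xi1 := if xi0 < prev then appendZeros xi0 1 else xi0
  let s1 := if xi0 < prev then s + 1 else s
  let xi2 := if xi1 < prev then
      let k := bsLoop xi1 prev 0 (10 ^ s1.toNat)
      xi1 + PySem.Int.floordiv (k * (k - 1)) 2
    else xi1
  (xi2, st.2 + s1)

def solve_alt (x : List Int) (n : Int) : Int :=
  if 2 ≤ n then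
    ((PySem.List.slice x (some 1) (some n)).foldl stepB
      (PySem.List.pyGetD x 0 0, (0 : Int))).2
  else 0

-- ===== PRECONDITION & SPEC =====
-- A raises IndexError iff 2 ≤ n and n > len(x) (the loop indexes x[0..n-1]); Pre_ excludes exactly that.
def Pre_solve (x : List Int) (n : Int) : Prop := n ≤ 1 ∨ n ≤ (x.length : Int)
instance (x : List Int) (n : Int) : Decidable (Pre_solve x n) := by unfold Pre_solve; infer_instance
def pvWitness_solve : List Int × Int := ([12, 3, 7], 3)

def Spec_solve (x : List Int) (n : Int) (out : Int) : Prop := out = solve_alt x n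
instance (x : List Int) (n : Int) (out : Int) : Decidable (Spec_solve x n out) := by unfold Spec_solve; infer_instance

-- ===== CLAIM (what is proved, stated in full; the proofs are below) =====
def Claim_equal_solve : Prop := ∀ (x : List Int) (n : Int), Dom_solve x n → Pre_solve x n → Spec_solve x n (solve x n)

-- ===== LEMMAS AND PROOFS =====

-- k*(k-1)//2, the amount A's j-loop has added after k additions
def tri (k : Int) : Int := PySem.Int.floordiv (k * (k - 1)) 2

theorem tri_zero : tri 0 = 0 := by decide

theorem tri_succ (j : Int) : tri (j + 1) = tri j + j := by
  unfold tri
  rw [PySem.Int.floordiv_eq_ediv_of_pos (by omega), PySem.Int.floordiv_eq_ediv_of_pos (by omega)]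
  have h : (j + 1) * (j + 1 - 1) = j * (j - 1) + j * 2 := by ring
  rw [h, Int.add_mul_ediv_right _ _ (by omega)]

theorem tri_mono {a b : Int} (ha : 0 ≤ a) (hab : a ≤ b) : tri a ≤ tri b := by
  unfold tri
  rw [PySem.Int.floordiv_eq_ediv_of_pos (by omega), PySem.Int.floordiv_eq_ediv_of_pos (by omega)]
  apply Int.ediv_le_ediv (by omega)
  have h : 0 ≤ (b - a) * (b + a - 1) := by
    rcases eq_or_lt_of_le hab with rfl | h
    · simp
    · apply mul_nonneg <;> omega
  nlinarith [h]

theorem loop_stop (p xi j : Int) (f : Nat) (h : ¬ xi < p) : solveLoop p xi j f = xi := by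
  induction f generalizing j with
  | zero => rfl
  | succ f ih => simp only [solveLoop, if_neg h]; exact ih _

theorem bs_bounds (xi p lo hi : Int) (h : lo ≤ hi) :
    lo ≤ bsLoop xi p lo hi ∧ bsLoop xi p lo hi ≤ hi := by
  fun_induction bsLoop with
  | case1 lo hi hlt mid hpred ih =>
      have hm := bsLoop_measure lo hi hlt
      have := ih (by omega)
      omega
  | case2 lo hi hlt mid hpred ih =>
      have hm := bsLoop_measure lo hi hlt
      have := ih (by omega)
      omega
  | case3 => omega

theorem bs_below (xi p lo hi : Int) (h0 : 0 ≤ lo) (h : lo ≤ hi) :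
    ∀ k, lo ≤ k → k < bsLoop xi p lo hi → xi + tri k < p := by
  fun_induction bsLoop with
  | case1 lo hi hlt mid hpred ih =>
      have hm := bsLoop_measure lo hi hlt
      exact ih h0 (by omega)
  | case2 lo hi hlt mid hpred ih =>
      intro k hk hkr
      have hm := bsLoop_measure lo hi hlt
      by_cases hkm : mid + 1 ≤ k
      · exact ih (by omega) (by omega) k hkm hkr
      · have hmono : tri k ≤ tri mid := tri_mono (by omega) (by omega)
        have hlt' : xi + tri mid < p := by
          simp only [not_le] at hpred
          exact hpred
        omega
  | case3 lo hi hlt =>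
      intro k hk hkr
      omega

theorem bs_found (xi p lo hi : Int) (hle : lo ≤ hi) :
    p ≤ xi + tri (bsLoop xi p lo hi) ∨ bsLoop xi p lo hi = hi := by
  fun_induction bsLoop with
  | case1 lo hi hlt mid hpred ih =>
      have hm := bsLoop_measure lo hi hlt
      rcases ih (by omega) with h | h
      · exact Or.inl h
      · exact Or.inl (by rw [h]; exact hpred)
  | case2 lo hi hlt mid hpred ih =>
      have hm := bsLoop_measure lo hi hlt
      exact ih (by omega)
  | case3 lo hi hlt => exact Or.inr (by omega)

theorem loop_run (p xi0 r L : Int) (hr0 : 0 ≤ r) (hrL : r ≤ L)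
    (hbelow : ∀ k, 0 ≤ k → k < r → xi0 + tri k < p)
    (hfound : p ≤ xi0 + tri r ∨ r = L) :
    ∀ (f : Nat) (j : Int), 0 ≤ j → j ≤ r → j + (f : Int) = L →
      solveLoop p (xi0 + tri j) j f = xi0 + tri r := by
  intro f
  induction f with
  | zero =>
      intro j h0 hjr hjf
      have : j = r := by omega
      rw [this]; rfl
  | succ f ih =>
      intro j h0 hjr hjf
      by_cases hj : j < r
      · have hcond : xi0 + tri j < p := hbelow j h0 hj
        simp only [solveLoop, if_pos hcond]
        have he : xi0 + tri j + j = xi0 + tri (j + 1) := by rw [tri_succ]; ring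
        rw [he]
        exact ih (j + 1) (by omega) (by omega) (by push_cast at hjf ⊢; omega)
      · have hjr' : j = r := by omega
        subst hjr'
        rcases hfound with h | h
        · exact loop_stop _ _ _ _ (by omega)
        · omega

-- A's full inner loop equals B's triangular-number jump
theorem loop_eq_bs (p xi L : Int) (hL : 0 ≤ L) :
    solveLoop p xi 0 L.toNat = if xi < p then xi + tri (bsLoop xi p 0 L) else xi := by
  by_cases h : xi < p
  · rw [if_pos h]
    have hb := bs_bounds xi p 0 L hL
    have hbel := bs_below xi p 0 L le_rfl hL
    have hf := bs_found xi p 0 L hL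
    have h0 := loop_run p xi (bsLoop xi p 0 L) L hb.1 hb.2 hbel hf L.toNat 0
      le_rfl hb.1 (by omega)
    simpa [tri_zero] using h0
  · rw [if_neg h]; exact loop_stop _ _ _ _ h

-- one step of A seen through one step of B
theorem stepAB (xs : List Int) (r i v : Int)
    (hv : PySem.List.pyGetD xs i 0 = v) :
    (stepA (xs, r) i).2 = (stepB (PySem.List.pyGetD xs (i - 1) 0, r) v).2 ∧
    (stepA (xs, r) i).1 = PySem.List.pySetD xs i (stepB (PySem.List.pyGetD xs (i - 1) 0, r) v).1 := by
  simp only [stepA, stepB, hv]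
  rw [loop_eq_bs _ _ _ (by positivity)]
  exact ⟨trivial, rfl⟩

-- the fold invariant relating A's indexed fold over the mutated list to B's pass
theorem fold_inv (x : List Int) (m : Nat) (h2 : m + 1 ≤ x.length) :
    (((PySem.List.pyRange 1 ((m + 1 : Nat) : Int) 1).foldl stepA (x, (0:Int))).2 =
      ((PySem.List.slice x (some 1) (some ((m + 1 : Nat) : Int))).foldl stepB
        (PySem.List.pyGetD x 0 0, (0:Int))).2) ∧
    (((PySem.List.pyRange 1 ((m + 1 : Nat) : Int) 1).foldl stepA (x, (0:Int))).1.length = x.length) ∧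
    (PySem.List.pyGetD ((PySem.List.pyRange 1 ((m + 1 : Nat) : Int) 1).foldl stepA (x, (0:Int))).1 (((m + 1 : Nat) : Int) - 1) 0 =
      ((PySem.List.slice x (some 1) (some ((m + 1 : Nat) : Int))).foldl stepB
        (PySem.List.pyGetD x 0 0, (0:Int))).1) ∧
    (∀ j : Nat, m + 1 ≤ j →
      (((PySem.List.pyRange 1 ((m + 1 : Nat) : Int) 1).foldl stepA (x, (0:Int))).1)[j]? = x[j]?) := by
  induction m with
  | zero =>
      rw [show (((0 + 1 : Nat)) : Int) = 1 by norm_num]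
      rw [PySem.List.pyRange_one_eq_nil (by omega)]
      rw [show (1 : Int) = ((1 : Nat) : Int) by norm_num, PySem.List.slice_natCast]
      simp [List.foldl_nil]
  | succ m ih =>
      have hlen : m + 1 ≤ x.length := by omega
      obtain ⟨ih1, ih2, ih3, ih4⟩ := ih hlen
      -- split range and slice
      have hr : PySem.List.pyRange 1 ((m + 1 + 1 : Nat) : Int) 1 =
          PySem.List.pyRange 1 ((m + 1 : Nat) : Int) 1 ++ [((m + 1 : Nat) : Int)] := by
        rw [show (((m + 1 + 1 : Nat)) : Int) = ((m + 1 : Nat) : Int) + 1 by push_cast; ring]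
        exact PySem.List.pyRange_one_succ_right (by push_cast; omega)
      have hxm : x[m + 1]? = some (x[m + 1]'(by omega)) := List.getElem?_eq_getElem (by omega)
      have hs : PySem.List.slice x (some 1) (some ((m + 1 + 1 : Nat) : Int)) =
          PySem.List.slice x (some 1) (some ((m + 1 : Nat) : Int)) ++ [x[m + 1]'(by omega)] := by
        rw [show (1 : Int) = ((1 : Nat) : Int) by norm_num, PySem.List.slice_natCast,
          PySem.List.slice_natCast]
        rw [show m + 1 + 1 - 1 = (m) + 1 by omega, show m + 1 - 1 = m by omega]
        rw [List.take_add_one]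
        congr 1
        rw [List.getElem?_drop]
        rw [show 1 + m = m + 1 by omega, hxm]
        rfl
      rw [hr, hs, List.foldl_append, List.foldl_append, List.foldl_cons, List.foldl_nil,
        List.foldl_cons, List.foldl_nil]
      -- names for the two pre-states
      set A1 := (PySem.List.pyRange 1 ((m + 1 : Nat) : Int) 1).foldl stepA (x, (0:Int)) with hA1
      set B1 := (PySem.List.slice x (some 1) (some ((m + 1 : Nat) : Int))).foldl stepB
        (PySem.List.pyGetD x 0 0, (0:Int)) with hB1
      have hvA : PySem.List.pyGetD A1.1 ((m + 1 : Nat) : Int) 0 = x[m + 1]'(by omega) := by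
        rw [PySem.List.pyGetD_natCast, List.getD_eq_getElem?_getD, ih4 (m + 1) le_rfl, hxm]
        rfl
      have hprev : PySem.List.pyGetD A1.1 (((m + 1 : Nat) : Int) - 1) 0 = B1.1 := ih3
      have hstep := stepAB A1.1 A1.2 ((m + 1 : Nat) : Int) (x[m + 1]'(by omega)) hvA
      rw [hprev] at hstep
      have hstA : stepA A1 ((m + 1 : Nat) : Int) = stepA (A1.1, A1.2) ((m + 1 : Nat) : Int) := by rfl
      have hstB : stepB B1 (x[m + 1]'(by omega)) = stepB (B1.1, B1.2) (x[m + 1]'(by omega)) := by rfl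
      rw [hstA, hstB, ← ih1]
      refine ⟨hstep.1, ?_, ?_, ?_⟩
      · rw [hstep.2, PySem.List.length_pySetD]; exact ih2
      · rw [hstep.2]
        rw [show (((m + 1 + 1 : Nat)) : Int) - 1 = ((m + 1 : Nat) : Int) by push_cast; ring]
        rw [PySem.List.pySetD_natCast, PySem.List.pyGetD_natCast, List.getD_eq_getElem?_getD,
          List.getElem?_set_self (by rw [ih2]; omega)]
        rfl
      · intro j hj
        rw [hstep.2, PySem.List.pySetD_natCast, List.getElem?_set_ne (by omega)]
        exact ih4 j (by omega)

theorem solve_eq_alt (x : List Int) (n : Int) (hpre : Pre_solve x n) :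
    solve x n = solve_alt x n := by
  by_cases hn : 2 ≤ n
  · have hlen : n ≤ (x.length : Int) := by
      rcases hpre with h | h
      · omega
      · exact h
    obtain ⟨m, hm⟩ : ∃ m : Nat, n = ((m + 1 : Nat) : Int) := ⟨n.toNat - 1, by omega⟩
    subst hm
    unfold solve solve_alt
    rw [if_pos hn]
    exact (fold_inv x m (by exact_mod_cast hlen)).1
  · unfold solve solve_alt
    rw [if_neg hn, PySem.List.pyRange_one_eq_nil (by omega)]
    rfl

-- ===== VERDICT (by name: the statement is the Claim_ definition above) =====
theorem solve_spec : Claim_equal_solve := by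
  intro x n _ hpre
  unfold Spec_solve
  exact solve_eq_alt x n hpre
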